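-- pv_equiv track=rewrite | github.com/chaoxu95/emnlp2020-code | semantic.py | remove_overlap_dict
-- ===== SOURCE A (Python) =====
-- def remove_overlap_list(source_list):
--     temp_list = source_list.copy()
--     for index, item in enumerate(temp_list):
--         compared_list = source_list.copy()
--         for temp in compared_list:
--             if set(item) > set(temp):
--                 source_list.remove(temp)
--     return source_list
--
-- def remove_overlap_dict(source_dict):
--     range_list = []
--     target_dict = {}
--     for range_x, prep in source_dict.items():
--         range_list.append(range_x)
--     range_list = remove_overlap_list(range_list)
--     for range_x in range_list:
--         target_dict[range_x] = source_dict[range_x]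
--     return target_dict
-- ===== SOURCE B (Python) =====
-- def remove_overlap_dict(source_dict):
--     items = list(source_dict.items())
--     sets = [set(k) for k, _ in items]
--     result = {}
--     for (k, v), s in zip(items, sets):
--         if not any(len(t) > len(s) and s <= t for t in sets):
--             result[k] = v
--     return result
-- ===== Notes on version B (the rewrite author's own statement) =====
-- stated objective: simpler
-- what changed: A snapshots the key list and destructively list.remove()s every key whose set is strictly contained in some key's set, then rebuilds the dict by re-indexing the source; B drops the remove_overlap_list helper entirely and makes one non-destructive pass that keeps a key iff no key's precomputed set is strictly larger and a superset, inserting survivors (with their values already in hand) in original order.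
import Mathlib
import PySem

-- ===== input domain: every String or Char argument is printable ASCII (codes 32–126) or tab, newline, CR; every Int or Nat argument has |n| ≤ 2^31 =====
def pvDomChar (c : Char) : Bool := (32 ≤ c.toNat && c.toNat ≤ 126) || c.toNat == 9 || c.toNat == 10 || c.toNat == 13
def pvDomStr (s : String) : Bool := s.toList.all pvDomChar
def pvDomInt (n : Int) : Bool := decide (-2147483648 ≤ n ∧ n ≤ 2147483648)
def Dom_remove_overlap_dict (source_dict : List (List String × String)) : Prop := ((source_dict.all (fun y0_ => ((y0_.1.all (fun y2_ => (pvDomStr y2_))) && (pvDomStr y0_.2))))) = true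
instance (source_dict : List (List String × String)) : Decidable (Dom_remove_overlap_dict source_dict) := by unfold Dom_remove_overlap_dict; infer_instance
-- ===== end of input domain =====

-- B replaces A's destructive snapshot-and-remove helper by a single non-destructive pass
-- that keeps a key iff no key's set is strictly larger and a superset (objective: simpler).
-- ===== PORT A =====

-- set(i) > set(t): proper superset, i.e. t ⊆ i and not i ⊆ t (membership via list containment)
def pvSetGt (i t : List String) : Bool :=
  t.all (fun x => i.contains x) && !(i.all (fun x => t.contains x))

-- inner loop of remove_overlap_list: 'for temp in compared_list: if set(item) > set(temp): source_list.remove(temp)'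
-- (temp is always present in source_list here, so .remove never raises ValueError; .getD is that dead branch)
def pvInnerLoop (item : List String) (compared source : List (List String)) : List (List String) :=
  match compared with
  | [] => source
  | t :: rest =>
      pvInnerLoop item rest
        (if pvSetGt item t then (PySem.List.remove? source t).getD source else source)

-- outer loop of remove_overlap_list: 'for index, item in enumerate(temp_list): compared_list = source_list.copy(); …'
def pvOuterLoop (temp source : List (List String)) : List (List String) :=
  match temp with
  | [] => source
  | item :: rest => pvOuterLoop rest (pvInnerLoop item source source)

def remove_overlap_list_port (source_list : List (List String)) : List (List String) :=
  pvOuterLoop source_list source_list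

def remove_overlap_dict (source_dict : List (List String × String)) : List (List String × String) :=
  -- 'for range_x, prep in source_dict.items(): range_list.append(range_x)'
  let range_list := source_dict.foldl (fun acc p => acc ++ [p.1]) []
  let range_list := remove_overlap_list_port range_list
  -- 'for range_x in range_list: target_dict[range_x] = source_dict[range_x]'
  -- (range_x is always a key of source_dict, so d[range_x] never raises KeyError; "" is that dead branch)
  (range_list.foldl
    (fun td k => PySem.Dict.insert td k (PySem.Dict.getD (PySem.Dict.mk source_dict) k ""))
    PySem.Dict.empty).items

-- ===== PORT B =====
def remove_overlap_dict_alt (source_dict : List (List String × String)) : List (List String × String) :=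
  let sets := source_dict.map (fun p => PySem.Set.ofList p.1)
  ((source_dict.zip sets).foldl
    (fun res q =>
      if sets.any (fun t => decide (q.2.length < t.length) && PySem.Set.issubset q.2 t) then res
      else PySem.Dict.insert res q.1.1 q.1.2)
    PySem.Dict.empty).items

-- ===== PRECONDITION & SPEC =====
-- The argument is a Python dict, whose keys are distinct; association lists with a repeated
-- key do not encode any dict input of A, so they lie outside Pre_.
def Pre_remove_overlap_dict (source_dict : List (List String × String)) : Prop :=
  (source_dict.map Prod.fst).Nodup

instance (source_dict : List (List String × String)) : Decidable (Pre_remove_overlap_dict source_dict) := by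
  unfold Pre_remove_overlap_dict; infer_instance

def pvWitness_remove_overlap_dict : (List (List String × String)) :=
  [(["a"], "x"), (["a", "b"], "y"), (["c"], "z")]

def Spec_remove_overlap_dict (source_dict : List (List String × String)) (out : List (List String × String)) : Prop := out = remove_overlap_dict_alt source_dict
instance (source_dict : List (List String × String)) (out : List (List String × String)) : Decidable (Spec_remove_overlap_dict source_dict out) := by unfold Spec_remove_overlap_dict; infer_instance

-- ===== CLAIM (what is proved, stated in full; the proofs are below) =====
def Claim_equal_remove_overlap_dict : Prop := ∀ (source_dict : List (List String × String)), Dom_remove_overlap_dict source_dict → Pre_remove_overlap_dict source_dict → Spec_remove_overlap_dict source_dict (remove_overlap_dict source_dict)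

-- ===== LEMMAS AND PROOFS =====

-- remove of a possibly-absent element, totalised as erase
theorem pv_removeD_eq_erase (s : List (List String)) (t : List String) :
    (PySem.List.remove? s t).getD s = s.erase t := by
  by_cases h : t ∈ s
  · rw [PySem.List.remove?_eq_some_erase s t h]; rfl
  · rw [(PySem.List.remove?_eq_none_iff s t).mpr h, List.erase_of_not_mem h]; rfl

theorem pvInnerLoop_eq_filter (item : List String) (compared source : List (List String))
    (hnd : source.Nodup) :
    pvInnerLoop item compared source
      = source.filter (fun t => !(compared.contains t && pvSetGt item t)) := by
  induction compared generalizing source with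
  | nil => simp [pvInnerLoop]
  | cons t rest ih =>
    simp only [pvInnerLoop]
    by_cases hgt : pvSetGt item t
    · rw [if_pos hgt, pv_removeD_eq_erase, ih _ (hnd.erase t),
        hnd.erase_eq_filter t, List.filter_filter]
      refine List.filter_congr ?_
      intro x hx
      by_cases hxt : x = t
      · subst hxt; simp [hgt]
      · simp [List.contains_eq_mem, hxt]
    · rw [if_neg hgt, ih _ hnd]
      refine List.filter_congr ?_
      intro x hx
      by_cases hxt : x = t
      · subst hxt; simp [hgt]
      · simp [List.contains_eq_mem, hxt]

theorem pvOuterLoop_eq_filter (I S : List (List String)) (hnd : S.Nodup) :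
    pvOuterLoop I S = S.filter (fun k => !(I.any (fun j => pvSetGt j k))) := by
  induction I generalizing S with
  | nil => simp [pvOuterLoop]
  | cons item rest ih =>
    simp only [pvOuterLoop]
    rw [pvInnerLoop_eq_filter item S S hnd, ih _ (hnd.filter _), List.filter_filter]
    refine List.filter_congr ?_
    intro x hx
    simp [List.contains_eq_mem, hx, Bool.not_or, Bool.and_comm]

-- the set comparison written with cardinalities (B's test) agrees with A's test
theorem pvSetGt_eq_card (j k : List String) :
    (decide ((PySem.Set.ofList k).length < (PySem.Set.ofList j).length)
      && PySem.Set.issubset (PySem.Set.ofList k) (PySem.Set.ofList j)) = pvSetGt j k := by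
  have hlen : ∀ l : List String, (PySem.Set.ofList l).length = l.toFinset.card := by
    intro l
    have hto : (PySem.Set.ofList l).toFinset = l.toFinset := by
      ext x; simp [PySem.Set.mem_ofList]
    rw [← hto, List.toFinset_card_of_nodup (PySem.Set.nodup_ofList l)]
  rw [Bool.eq_iff_iff]
  simp only [Bool.and_eq_true, decide_eq_true_eq, PySem.Set.issubset_iff, pvSetGt,
    PySem.Set.mem_ofList, Bool.not_eq_true', List.all_eq_true, List.contains_eq_mem,
    List.all_eq_false, hlen]
  constructor
  · rintro ⟨hlt, hsub⟩
    refine ⟨fun x hx => by simpa using hsub x hx, ?_⟩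
    by_contra h
    simp only [not_exists, not_and, not_not] at h
    have hJK : j.toFinset ⊆ k.toFinset := fun x hx => by
      simpa using h x (List.mem_toFinset.mp hx)
    exact absurd (Finset.card_le_card hJK) (by omega)
  · rintro ⟨hsub, x, hxj, hxk⟩
    refine ⟨?_, fun y hy => by simpa using hsub y hy⟩
    have hKJ : k.toFinset ⊆ j.toFinset := fun y hy => by
      simpa using hsub y (List.mem_toFinset.mp hy)
    refine Finset.card_lt_card ⟨hKJ, fun hc => ?_⟩
    exact hxk (List.mem_toFinset.mp (hc (List.mem_toFinset.mpr hxj)))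

-- first-match lookup of a key of a Nodup-keyed assoc list returns its value
theorem pv_getD_mk (l : List (List String × String)) (hnd : (l.map Prod.fst).Nodup)
    (p : List String × String) (hp : p ∈ l) :
    PySem.Dict.getD (PySem.Dict.mk l) p.1 "" = p.2 := by
  induction l with
  | nil => cases hp
  | cons q rest ih =>
    cases q with
    | mk qk qv =>
      rw [List.map_cons, List.nodup_cons] at hnd
      rcases List.mem_cons.mp hp with hp | hp
      · subst hp
        simp [PySem.Dict.getD, PySem.Dict.get?_mk_cons]
      · have hmem : p.1 ∈ rest.map Prod.fst := List.mem_map_of_mem hp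
        have hne : qk ≠ p.1 := fun h => hnd.1 (by rw [h]; exact hmem)
        simp only [PySem.Dict.getD]
        rw [PySem.Dict.get?_mk_cons]
        simp only [beq_iff_eq]
        rw [if_neg hne]
        exact ih hnd.2 hp

theorem pv_items_empty :
    (PySem.Dict.empty (κ := List String) (ν := String)).items = [] := rfl

-- a fold that skips on a test is the fold of the filtered list
theorem pv_foldl_if_skip (l : List (List String × String)) (c : List String × String → Bool)
    (d0 : PySem.Dict (List String) String) :
    l.foldl (fun d p => if c p then d else d.insert p.1 p.2) d0
      = (l.filter (fun p => !c p)).foldl (fun d p => d.insert p.1 p.2) d0 := by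
  induction l generalizing d0 with
  | nil => rfl
  | cons p rest ih =>
    by_cases h : c p <;> simp [h, ih]

-- ===== VERDICT =====
theorem remove_overlap_dict_spec : Claim_equal_remove_overlap_dict := by
  intro src _hdom hpre
  unfold Pre_remove_overlap_dict at hpre
  unfold Spec_remove_overlap_dict
  -- A's side: the key list, filtered by the survivor test, paired with the dict lookups
  have hA : remove_overlap_dict src
      = (((src.map Prod.fst).filter
            (fun k => !((src.map Prod.fst).any (fun j => pvSetGt j k)))).map
          (fun a => (a, PySem.Dict.getD (PySem.Dict.mk src) a ""))) := by
    unfold remove_overlap_dict remove_overlap_list_port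
    simp only
    rw [PySem.List.foldl_append_singleton_eq_map, List.nil_append,
      pvOuterLoop_eq_filter _ _ hpre]
    rw [PySem.Dict.items_foldl_insert_fresh _ (fun a => a)
      (fun a => PySem.Dict.getD (PySem.Dict.mk src) a "") PySem.Dict.empty
      (fun a _ => rfl) (by simpa using hpre.filter _)]
    simp [pv_items_empty]
  have hA2 : remove_overlap_dict src
      = src.filter (fun p => !(src.any (fun r => pvSetGt r.1 p.1))) := by
    rw [hA, List.filter_map, List.map_map]
    have : ∀ p ∈ src.filter ((fun k => !((src.map Prod.fst).any (fun j => pvSetGt j k))) ∘ Prod.fst),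
        ((fun a => (a, PySem.Dict.getD (PySem.Dict.mk src) a "")) ∘ Prod.fst) p = id p := by
      intro p hp
      simp only [Function.comp, id]
      rw [pv_getD_mk src hpre p (List.mem_of_mem_filter hp)]
    rw [List.map_congr_left this, List.map_id]
    refine List.filter_congr ?_
    intro p _
    simp only [List.any_map]
    rfl
  -- B's side
  have hB : remove_overlap_dict_alt src
      = src.filter (fun p => !(src.any (fun r =>
          decide ((PySem.Set.ofList p.1).length < (PySem.Set.ofList r.1).length)
            && PySem.Set.issubset (PySem.Set.ofList p.1) (PySem.Set.ofList r.1)))) := by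
    unfold remove_overlap_dict_alt
    simp only
    rw [show src.zip (src.map fun p => PySem.Set.ofList p.1)
          = src.map (fun p => (p, PySem.Set.ofList p.1)) from by
        simpa using (List.zip_map' (f := id) (g := fun p => PySem.Set.ofList p.1) (l := src))]
    rw [List.foldl_map]
    dsimp only
    rw [pv_foldl_if_skip]
    rw [PySem.Dict.items_foldl_insert_fresh _ Prod.fst Prod.snd PySem.Dict.empty
      (fun a _ => rfl)
      (List.Nodup.sublist (List.Sublist.map Prod.fst List.filter_sublist) hpre)]
    simp only [pv_items_empty, List.nil_append, Prod.mk.eta, List.map_id']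
    refine List.filter_congr ?_
    intro p _
    simp only [List.any_map]
    rfl
  rw [hA2, hB]
  refine List.filter_congr ?_
  intro p _
  simp only [← pvSetGt_eq_card]
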